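-- pv_equiv track=rewrite | github.com/masaakikubota/AnyAIInsightAgent | app/interview_manager.py | _parse_manual_stimuli
-- ===== SOURCE A (Python) =====
-- from typing import Any, Dict, List, Optional, Tuple
--
-- def _parse_manual_stimuli(text: Optional[str]) -> List[str]:
--     if not text:
--         return []
--     raw_items = [item.strip() for item in text.replace("\r", "\n").split("\n") if item.strip()]
--     if not raw_items:
--         return []
--     stimuli: List[str] = []
--     for item in raw_items:
--         stimuli.extend([part.strip() for part in item.split(",") if part.strip()])
--     return stimuli
-- ===== SOURCE B (Python) =====
-- from typing import List, Optional
--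
-- def _parse_manual_stimuli(text: Optional[str]) -> List[str]:
--     # Single pass over the characters: cut at '\r', '\n' or ',', strip each
--     # chunk, keep the non-empty ones.
--     if not text:
--         return []
--     stimuli: List[str] = []
--     buf: List[str] = []
--     for ch in text + "\n":
--         if ch in "\r\n,":
--             token = "".join(buf).strip()
--             if token:
--                 stimuli.append(token)
--             buf = []
--         else:
--             buf.append(ch)
--     return stimuli
-- ===== Notes on version B (the rewrite author's own statement) =====
-- stated objective: alternative
-- what changed: Replaced A's two-stage split (replace , split on , strip/filter lines, then split each line on , with a second strip/filter) by a single character-level scan that cuts at any of , and emits each stripped non-empty chunk once.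
import Mathlib
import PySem

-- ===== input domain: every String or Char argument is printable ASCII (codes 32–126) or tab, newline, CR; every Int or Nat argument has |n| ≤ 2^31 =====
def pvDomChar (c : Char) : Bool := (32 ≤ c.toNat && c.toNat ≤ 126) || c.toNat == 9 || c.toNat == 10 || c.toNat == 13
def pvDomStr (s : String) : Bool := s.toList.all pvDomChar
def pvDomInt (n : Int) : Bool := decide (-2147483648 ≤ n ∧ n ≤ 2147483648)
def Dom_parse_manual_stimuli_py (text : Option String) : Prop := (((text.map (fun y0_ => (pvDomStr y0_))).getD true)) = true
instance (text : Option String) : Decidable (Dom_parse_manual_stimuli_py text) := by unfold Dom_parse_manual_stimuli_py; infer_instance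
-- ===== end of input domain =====

-- B replaces A's two-stage split (replace '\r', split on '\n', strip/filter the lines, split each line on ',',
-- strip/filter again) by a single character scan that cuts at any of '\r' '\n' ',' and emits each stripped
-- non-empty chunk; a different decomposition of the same task, same cost.

-- ===== PORT A =====
-- s.split(sep) for a NONEMPTY literal sep: exactly PySem.Chars.splitOn on the code points (PySem.Str.split? unwrapped).
def pvStrSplit (s sep : String) : List String :=
  (PySem.Chars.splitOn s.toList sep.toList).map String.ofList

def parse_manual_stimuli_py (text : Option String) : List String :=
  match text with
  | none => []
  | some s =>
    if s = "" then []
    else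
      let raw_items :=
        ((pvStrSplit (PySem.Str.replace s "\r" "\n") "\n").filter
            (fun item => PySem.Str.strip item ≠ "")).map PySem.Str.strip
      if raw_items = [] then []
      else
        raw_items.foldl
          (fun stimuli item =>
            stimuli ++ ((pvStrSplit item ",").filter
                (fun part => PySem.Str.strip part ≠ "")).map PySem.Str.strip)
          []

-- ===== PORT B =====
def parse_manual_stimuli_py_alt (text : Option String) : List String :=
  match text with
  | none => []
  | some s =>
    if s = "" then []
    else
      (((s ++ "\n").toList).foldl
        (fun (acc : List String × List Char) ch =>
          if ch == '\r' || ch == '\n' || ch == ',' then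
            let token := PySem.Str.strip (String.ofList acc.2)
            (if token = "" then acc.1 else acc.1 ++ [token], [])
          else (acc.1, acc.2 ++ [ch]))
        ([], [])).1

-- ===== PRECONDITION & SPEC =====
def Spec_parse_manual_stimuli_py (text : Option String) (out : List String) : Prop := out = parse_manual_stimuli_py_alt text
instance (text : Option String) (out : List String) : Decidable (Spec_parse_manual_stimuli_py text out) := by unfold Spec_parse_manual_stimuli_py; infer_instance

-- ===== CLAIM (what is proved, stated in full; the proofs are below) =====
def Claim_equal_parse_manual_stimuli_py : Prop := ∀ (text : Option String), Dom_parse_manual_stimuli_py text → Spec_parse_manual_stimuli_py text (parse_manual_stimuli_py text)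

-- ===== LEMMAS AND PROOFS =====

-- the character substitution performed by text.replace("\r", "\n")
def pvSub (c : Char) : Char := if c == '\r' then '\n' else c
-- the combined delimiter set
def pvDelim (c : Char) : Bool := c == '\r' || c == '\n' || c == ','

-- split a char list at every char satisfying P
def pvPieces (P : Char → Bool) : List Char → List (List Char)
  | [] => [[]]
  | c :: t => if P c then [] :: pvPieces P t else (pvPieces P t).modifyHead (c :: ·)

def pvEmit (p : List Char) : Option (List Char) :=
  if PySem.Chars.strip p = [] then none else some (PySem.Chars.strip p)

def pvToks (P : Char → Bool) (cs : List Char) : List (List Char) :=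
  (pvPieces P cs).filterMap pvEmit

-- the common normal form of both programs: stripped non-empty chunks between delimiters
def pvResult (cs : List Char) : List String :=
  (pvToks pvDelim cs).map String.ofList

theorem pvPieces_ne_nil (P : Char → Bool) (cs : List Char) : pvPieces P cs ≠ [] := by
  induction cs with
  | nil => simp [pvPieces]
  | cons c t ih =>
    simp only [pvPieces]
    split
    · simp
    · cases h : pvPieces P t with
      | nil => exact absurd h ih
      | cons q qs => simp [List.modifyHead]

theorem pv_replace_go (l : List Char) : ∀ (fuel : Nat) (acc : List Char), l.length ≤ fuel →
    PySem.Chars.replace.go ['\r'] ['\n'] fuel l acc = acc.reverse ++ l.map pvSub := by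
  induction l with
  | nil =>
    intro fuel acc _
    cases fuel <;> simp [PySem.Chars.replace.go]
  | cons c t ih =>
    intro fuel acc hf
    cases fuel with
    | zero => simp at hf
    | succ n =>
      rw [PySem.Chars.replace.go]
      by_cases hc : c = '\r'
      · subst hc
        rw [if_pos (by simp [List.isPrefixOf])]
        show PySem.Chars.replace.go ['\r'] ['\n'] n t ('\n' :: acc) = _
        rw [ih n _ (by simpa using hf)]
        simp [pvSub]
      · rw [if_neg (by simp [List.isPrefixOf]; exact fun h => hc h.symm)]
        rw [ih n _ (by simpa using hf)]
        simp [pvSub, hc]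

theorem pv_replace (cs : List Char) : PySem.Chars.replace cs ['\r'] ['\n'] = cs.map pvSub := by
  rw [PySem.Chars.replace]
  simp only [List.isEmpty_cons, Bool.false_eq_true, if_false]
  rw [pv_replace_go cs cs.length [] le_rfl]
  simp

def pvHead (pre : List Char) : List (List Char) → List (List Char)
  | p :: r => (pre ++ p) :: r
  | [] => [pre]

theorem pv_splitOn_go (d : Char) (l : List Char) : ∀ (fuel : Nat) (cur : List Char) (acc : List (List Char)),
    l.length < fuel →
    PySem.Chars.splitOn.go [d] fuel l cur acc
      = acc.reverse ++ pvHead cur.reverse (pvPieces (· == d) l) := by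
  induction l with
  | nil =>
    intro fuel cur acc hf
    cases fuel with
    | zero => omega
    | succ n => simp [PySem.Chars.splitOn.go, pvHead, pvPieces]
  | cons c t ih =>
    intro fuel cur acc hf
    cases fuel with
    | zero => omega
    | succ n =>
      rw [PySem.Chars.splitOn.go]
      by_cases hc : d = c
      · subst hc
        rw [if_pos (by simp [List.isPrefixOf])]
        show PySem.Chars.splitOn.go [d] n t [] (cur.reverse :: acc) = _
        rw [ih n _ _ (by simpa using hf)]
        cases h : pvPieces (· == d) t with
        | nil => exact absurd h (pvPieces_ne_nil _ _)
        | cons q qs => simp [pvHead, pvPieces, h]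
      · rw [if_neg (by simp [List.isPrefixOf]; exact hc)]
        rw [ih n _ _ (by simpa using hf)]
        have hcd : (c == d) = false := beq_eq_false_iff_ne.mpr (fun h => hc h.symm)
        cases h : pvPieces (· == d) t with
        | nil => exact absurd h (pvPieces_ne_nil _ _)
        | cons q qs => simp [pvHead, pvPieces, h, hcd, List.modifyHead]

theorem pv_splitOn (d : Char) (cs : List Char) :
    PySem.Chars.splitOn cs [d] = pvPieces (· == d) cs := by
  rw [PySem.Chars.splitOn, pv_splitOn_go d cs (cs.length + 1) [] [] (by omega)]
  cases h : pvPieces (· == d) cs with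
  | nil => exact absurd h (pvPieces_ne_nil _ _)
  | cons q qs => simp [pvHead]

theorem pvPieces_map_sub (cs : List Char) :
    pvPieces (· == '\n') (cs.map pvSub) = pvPieces (fun c => c == '\r' || c == '\n') cs := by
  induction cs with
  | nil => rfl
  | cons c t ih =>
    by_cases hr : c = '\r'
    · subst hr; simp [pvPieces, pvSub, ih]
    · by_cases hn : c = '\n'
      · subst hn; simp [pvPieces, pvSub, ih]
      · simp [pvPieces, pvSub, hr, hn, ih]

theorem pvPieces_or (Q P : Char → Bool) (cs : List Char) :
    pvPieces (fun c => Q c || P c) cs = (pvPieces Q cs).flatMap (pvPieces P) := by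
  induction cs with
  | nil => simp [pvPieces]
  | cons c t ih =>
    by_cases hq : Q c = true
    · simp [pvPieces, hq, ih]
    · simp only [Bool.not_eq_true] at hq
      by_cases hp : P c = true
      · cases h : pvPieces Q t with
        | nil => exact absurd h (pvPieces_ne_nil _ _)
        | cons q qs =>
          simp [pvPieces, hq, hp, ih, h, List.modifyHead]
      · simp only [Bool.not_eq_true] at hp
        cases h : pvPieces Q t with
        | nil => exact absurd h (pvPieces_ne_nil _ _)
        | cons q qs =>
          cases h2 : pvPieces P q with
          | nil => exact absurd h2 (pvPieces_ne_nil _ _)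
          | cons r rs =>
            simp [pvPieces, hq, hp, ih, h, h2, List.modifyHead]

-- strip facts
theorem pv_strip_cons_space {c : Char} (h : PySem.Chars.isspace c = true) (p : List Char) :
    PySem.Chars.strip (c :: p) = PySem.Chars.strip p := by
  simp [PySem.Chars.strip, PySem.Chars.lstrip, h]

theorem pv_rstrip_append_space {c : Char} (h : PySem.Chars.isspace c = true) (p : List Char) :
    PySem.Chars.rstrip (p ++ [c]) = PySem.Chars.rstrip p := by
  simp [PySem.Chars.rstrip, h]

theorem pv_strip_append_space {c : Char} (h : PySem.Chars.isspace c = true) (p : List Char) :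
    PySem.Chars.strip (p ++ [c]) = PySem.Chars.strip p := by
  simp only [PySem.Chars.strip, PySem.Chars.lstrip]
  rw [List.dropWhile_append]
  by_cases hnil : (List.dropWhile PySem.Chars.isspace p).isEmpty
  · rw [if_pos hnil]
    simp only [List.isEmpty_iff] at hnil
    simp [hnil, h, PySem.Chars.rstrip]
  · rw [if_neg hnil]
    exact pv_rstrip_append_space h _

theorem pv_strip_eq_nil_iff (p : List Char) :
    PySem.Chars.strip p = [] ↔ ∀ c ∈ p, PySem.Chars.isspace c = true := by
  constructor
  · intro h c hc
    simp only [PySem.Chars.strip, PySem.Chars.rstrip, PySem.Chars.lstrip] at h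
    rw [List.reverse_eq_nil_iff, List.dropWhile_eq_nil_iff] at h
    rw [← List.takeWhile_append_dropWhile (p := PySem.Chars.isspace) (l := p)] at hc
    rcases List.mem_append.mp hc with h1 | h2
    · exact List.mem_takeWhile_imp h1
    · exact h _ (List.mem_reverse.mpr h2)
  · intro h
    simp only [PySem.Chars.strip, PySem.Chars.lstrip, PySem.Chars.rstrip]
    rw [List.dropWhile_eq_nil_iff.mpr (fun c hc => h c hc)]
    simp

def pvModLast (f : List Char → List Char) : List (List Char) → List (List Char)
  | [] => []
  | [q] => [f q]
  | q :: r :: rs => q :: pvModLast f (r :: rs)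

theorem pvPieces_append {P : Char → Bool} {c : Char} (hc : P c = false) (p : List Char) :
    pvPieces P (p ++ [c]) = pvModLast (· ++ [c]) (pvPieces P p) := by
  induction p with
  | nil => simp [pvPieces, hc, List.modifyHead, pvModLast]
  | cons x p' ih =>
    by_cases hx : P x = true
    · rw [List.cons_append]
      simp only [pvPieces, hx, if_true, ih]
      cases h : pvPieces P p' with
      | nil => exact absurd h (pvPieces_ne_nil _ _)
      | cons q qs => cases qs <;> simp [pvModLast]
    · simp only [Bool.not_eq_true] at hx
      rw [List.cons_append]
      simp only [pvPieces, hx, Bool.false_eq_true, if_false, ih]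
      cases h : pvPieces P p' with
      | nil => exact absurd h (pvPieces_ne_nil _ _)
      | cons q qs =>
        cases qs with
        | nil => simp [pvModLast, List.modifyHead]
        | cons r rs => simp [pvModLast, List.modifyHead]

theorem pv_filterMap_emit_modifyLast {c : Char} (h : PySem.Chars.isspace c = true)
    (ps : List (List Char)) :
    (pvModLast (· ++ [c]) ps).filterMap pvEmit = ps.filterMap pvEmit := by
  induction ps with
  | nil => rfl
  | cons q qs ih =>
    cases qs with
    | nil => simp [pvModLast, List.filterMap_cons, pvEmit, pv_strip_append_space h]
    | cons r rs =>
      simp only [pvModLast, List.filterMap_cons]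
      rw [show List.filterMap pvEmit (pvModLast (fun x => x ++ [c]) (r :: rs)) = List.filterMap pvEmit (r :: rs) from ih]
      simp only [List.filterMap_cons]

theorem pvToks_lstrip {P : Char → Bool} (hP : ∀ c, PySem.Chars.isspace c = true → P c = false)
    (p : List Char) : pvToks P (PySem.Chars.lstrip p) = pvToks P p := by
  rw [PySem.Chars.lstrip]
  induction p with
  | nil => rfl
  | cons c t ih =>
    by_cases hc : PySem.Chars.isspace c = true
    · rw [List.dropWhile_cons_of_pos hc, ih]
      show pvToks P t = (pvPieces P (c :: t)).filterMap pvEmit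
      simp only [pvPieces, hP c hc, Bool.false_eq_true, if_false]
      cases h : pvPieces P t with
      | nil => exact absurd h (pvPieces_ne_nil _ _)
      | cons q qs =>
        simp only [List.modifyHead, List.filterMap_cons, pvToks, h]
        have : pvEmit (c :: q) = pvEmit q := by
          simp [pvEmit, pv_strip_cons_space hc]
        rw [this]
    · rw [List.dropWhile_cons_of_neg hc]

theorem pvToks_rstrip {P : Char → Bool} (hP : ∀ c, PySem.Chars.isspace c = true → P c = false)
    (p : List Char) : pvToks P (PySem.Chars.rstrip p) = pvToks P p := by
  induction p using List.reverseRecOn with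
  | nil => rfl
  | append_singleton p' c ih =>
    by_cases hc : PySem.Chars.isspace c = true
    · rw [pv_rstrip_append_space hc, ih]
      show pvToks P p' = pvToks P (p' ++ [c])
      symm
      rw [pvToks, pvPieces_append (hP c hc), pv_filterMap_emit_modifyLast hc]
      rfl
    · have : PySem.Chars.rstrip (p' ++ [c]) = p' ++ [c] := by
        simp only [PySem.Chars.rstrip, List.reverse_append, List.reverse_cons, List.reverse_nil,
          List.nil_append, List.singleton_append, List.dropWhile_cons_of_neg hc]
        simp
      rw [this]

theorem pvToks_strip {P : Char → Bool} (hP : ∀ c, PySem.Chars.isspace c = true → P c = false)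
    (p : List Char) : pvToks P (PySem.Chars.strip p) = pvToks P p := by
  rw [PySem.Chars.strip, pvToks_rstrip hP, pvToks_lstrip hP]

theorem pvPieces_subset {P : Char → Bool} {q cs : List Char} (hq : q ∈ pvPieces P cs) :
    ∀ c ∈ q, c ∈ cs := by
  induction cs generalizing q with
  | nil => simp [pvPieces] at hq; simp [hq]
  | cons x t ih =>
    intro c hc
    by_cases hx : P x = true
    · simp only [pvPieces, hx, if_true, List.mem_cons] at hq
      rcases hq with rfl | hq
      · simp at hc
      · exact List.mem_cons_of_mem _ (ih hq c hc)
    · simp only [Bool.not_eq_true] at hx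
      simp only [pvPieces, hx, Bool.false_eq_true, if_false] at hq
      cases h : pvPieces P t with
      | nil => exact absurd h (pvPieces_ne_nil _ _)
      | cons r rs =>
        rw [h] at hq
        simp only [List.modifyHead, List.mem_cons] at hq
        rcases hq with rfl | hq
        · rcases List.mem_cons.mp hc with rfl | hc2
          · exact List.mem_cons_self
          · exact List.mem_cons_of_mem _ (ih (h ▸ List.mem_cons_self) c hc2)
        · exact List.mem_cons_of_mem _ (ih (h ▸ List.mem_cons_of_mem _ hq) c hc)

theorem pvToks_of_strip_nil {P : Char → Bool} {p : List Char}
    (h : PySem.Chars.strip p = []) : pvToks P p = [] := by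
  rw [pvToks, List.filterMap_eq_nil_iff]
  intro q hq
  have : PySem.Chars.strip q = [] := by
    rw [pv_strip_eq_nil_iff]
    intro c hc
    exact (pv_strip_eq_nil_iff p).mp h c (pvPieces_subset hq c hc)
  simp [pvEmit, this]

-- bridges between String ops on ofList and the char level
theorem pv_str_strip_ofList (p : List Char) :
    PySem.Str.strip (String.ofList p) = String.ofList (PySem.Chars.strip p) := by
  rw [PySem.Str.strip, String.toList_ofList]

theorem pv_ofList_eq_empty (p : List Char) : (String.ofList p = "") ↔ p = [] := by
  rw [← String.toList_eq_nil_iff, String.toList_ofList]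

-- strip-then-filter over pieces, at String level, is filterMap pvEmit at char level
theorem pv_filter_strip_map (ps : List (List Char)) :
    ((ps.map String.ofList).filter (fun part => PySem.Str.strip part ≠ "")).map PySem.Str.strip
      = (ps.filterMap pvEmit).map String.ofList := by
  induction ps with
  | nil => rfl
  | cons q qs ih =>
    by_cases h : PySem.Chars.strip q = []
    · simp only [List.map_cons, List.filter_cons, List.filterMap_cons, pv_str_strip_ofList,
        pv_ofList_eq_empty, pvEmit, h, ne_eq, not_true_eq_false, decide_false, if_false,
        Bool.false_eq_true, if_neg]
      exact ih
    · have hcond : (decide (PySem.Str.strip (String.ofList q) ≠ "")) = true := by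
        simp [pv_str_strip_ofList, pv_ofList_eq_empty, h]
      have hemit : pvEmit q = some (PySem.Chars.strip q) := by simp [pvEmit, h]
      rw [List.map_cons, List.filter_cons, hcond]
      simp only [if_true, List.map_cons, List.filterMap_cons, hemit, pv_str_strip_ofList]
      rw [ih]

-- the inner comma pass of A, at char level
theorem pv_inner_eq (q : List Char) :
    ((pvStrSplit (String.ofList q) ",").filter
        (fun part => PySem.Str.strip part ≠ "")).map PySem.Str.strip
      = (pvToks (· == ',') q).map String.ofList := by
  rw [pvStrSplit, String.toList_ofList]
  rw [show ("," : String).toList = [','] from rfl, pv_splitOn]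
  exact pv_filter_strip_map _

theorem pv_A_eq (s : String) (hs : ¬ s = "") :
    parse_manual_stimuli_py (some s) = pvResult s.toList := by
  have hcomma : ∀ c, PySem.Chars.isspace c = true → (c == ',') = false := by
    intro c h
    refine beq_eq_false_iff_ne.mpr ?_
    rintro rfl
    exact absurd h (by decide)
  have hlines : pvStrSplit (PySem.Str.replace s "\r" "\n") "\n"
      = (pvPieces (fun c => c == '\r' || c == '\n') s.toList).map String.ofList := by
    rw [pvStrSplit, PySem.Str.toList_replace]
    rw [show ("\r" : String).toList = ['\r'] from rfl, show ("\n" : String).toList = ['\n'] from rfl]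
    rw [pv_replace, pv_splitOn, pvPieces_map_sub]
  have hraw : ((pvStrSplit (PySem.Str.replace s "\r" "\n") "\n").filter
        (fun item => PySem.Str.strip item ≠ "")).map PySem.Str.strip
      = ((pvPieces (fun c => c == '\r' || c == '\n') s.toList).filterMap pvEmit).map String.ofList := by
    rw [hlines, pv_filter_strip_map]
  have hout : (pvPieces (fun c => c == '\r' || c == '\n') s.toList).flatMap
        (fun p => (pvToks (· == ',') p).map String.ofList) = pvResult s.toList := by
    have hsplit : pvPieces pvDelim s.toList
        = (pvPieces (fun c => c == '\r' || c == '\n') s.toList).flatMap (pvPieces (· == ',')) := by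
      calc pvPieces pvDelim s.toList
          = pvPieces (fun c => (fun c => c == '\r' || c == '\n') c || (c == ',')) s.toList := by
            rw [show pvDelim = (fun c => (fun c => c == '\r' || c == '\n') c || (c == ',')) from by
              funext c; simp [pvDelim, Bool.or_assoc]]
        _ = _ := pvPieces_or _ _ _
    rw [← List.map_flatMap]
    rw [pvResult, pvToks]
    congr 1
    rw [hsplit, List.filterMap_flatMap]
    rfl
  have houter : ((pvPieces (fun c => c == '\r' || c == '\n') s.toList).filterMap pvEmit).flatMap
        (fun q => (pvToks (· == ',') q).map String.ofList)
      = (pvPieces (fun c => c == '\r' || c == '\n') s.toList).flatMap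
        (fun p => (pvToks (· == ',') p).map String.ofList) := by
    generalize pvPieces _ s.toList = lines
    induction lines with
    | nil => rfl
    | cons p ps ih =>
      rw [List.filterMap_cons]
      by_cases hq : PySem.Chars.strip p = []
      · rw [show pvEmit p = none from by simp [pvEmit, hq]]
        simp only [List.flatMap_cons, pvToks_of_strip_nil hq, List.map_nil, List.nil_append, ih]
      · rw [show pvEmit p = some (PySem.Chars.strip p) from by simp [pvEmit, hq]]
        simp only [List.flatMap_cons, ih, pvToks_strip hcomma]
  show (if s = "" then []
    else
      let raw_items := ((pvStrSplit (PySem.Str.replace s "\r" "\n") "\n").filter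
            (fun item => PySem.Str.strip item ≠ "")).map PySem.Str.strip
      if raw_items = [] then []
      else raw_items.foldl (fun stimuli item =>
            stimuli ++ ((pvStrSplit item ",").filter
                (fun part => PySem.Str.strip part ≠ "")).map PySem.Str.strip) []) = pvResult s.toList
  rw [if_neg hs]
  show (if ((pvStrSplit (PySem.Str.replace s "\r" "\n") "\n").filter
            (fun item => PySem.Str.strip item ≠ "")).map PySem.Str.strip = [] then []
      else (((pvStrSplit (PySem.Str.replace s "\r" "\n") "\n").filter
            (fun item => PySem.Str.strip item ≠ "")).map PySem.Str.strip).foldl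
          (fun stimuli item =>
            stimuli ++ ((pvStrSplit item ",").filter
                (fun part => PySem.Str.strip part ≠ "")).map PySem.Str.strip) []) = pvResult s.toList
  rw [hraw]
  by_cases hnil : (pvPieces (fun c => c == '\r' || c == '\n') s.toList).filterMap pvEmit = []
  · rw [hnil]
    simp only [List.map_nil, if_pos rfl]
    rw [← hout, ← houter, hnil]
    rfl
  · rw [if_neg (by simpa using hnil)]
    rw [PySem.List.foldl_append_eq_flatMap]
    rw [List.nil_append]
    simp only [List.flatMap_map]
    simp only [pv_inner_eq]
    rw [houter, hout]

-- B-side loop invariant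
theorem pvPieces_no_delim {P : Char → Bool} {buf : List Char}
    (h : ∀ c ∈ buf, P c = false) : pvPieces P buf = [buf] := by
  induction buf with
  | nil => rfl
  | cons c t ih =>
    simp only [pvPieces, h c List.mem_cons_self, Bool.false_eq_true, if_false]
    rw [ih (fun x hx => h x (List.mem_cons_of_mem _ hx))]
    rfl

theorem pvPieces_append_delim {P : Char → Bool} {buf : List Char} {c : Char}
    (h : ∀ x ∈ buf, P x = false) (hc : P c = true) (rest : List Char) :
    pvPieces P (buf ++ c :: rest) = buf :: pvPieces P rest := by
  induction buf with
  | nil => simp [pvPieces, hc]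
  | cons x t ih =>
    simp only [List.cons_append, pvPieces, h x List.mem_cons_self, Bool.false_eq_true, if_false]
    rw [ih (fun y hy => h y (List.mem_cons_of_mem _ hy))]
    rfl

theorem pv_B_loop (xs : List Char) : ∀ (st : List String) (buf : List Char),
    (∀ c ∈ buf, pvDelim c = false) →
    ((xs ++ ['\n']).foldl
        (fun (acc : List String × List Char) ch =>
          if ch == '\r' || ch == '\n' || ch == ',' then
            let token := PySem.Str.strip (String.ofList acc.2)
            (if token = "" then acc.1 else acc.1 ++ [token], [])
          else (acc.1, acc.2 ++ [ch])) (st, buf)).1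
      = st ++ (pvToks pvDelim (buf ++ xs)).map String.ofList := by
  induction xs with
  | nil =>
    intro st buf hbuf
    simp only [List.nil_append, List.singleton_append, List.foldl_cons, List.foldl_nil]
    rw [if_pos (by decide)]
    have hpieces : pvToks pvDelim buf = (List.filterMap pvEmit [buf]) := by
      rw [pvToks, pvPieces_no_delim hbuf]
    by_cases hq : PySem.Chars.strip buf = []
    · have : PySem.Str.strip (String.ofList buf) = "" := by
        rw [pv_str_strip_ofList, hq]
      simp [this, hpieces, List.filterMap_cons, pvEmit, hq, List.append_nil]
    · have : ¬ (PySem.Str.strip (String.ofList buf) = "") := by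
        rw [pv_str_strip_ofList, pv_ofList_eq_empty]; exact hq
      simp [this, hpieces, List.filterMap_cons, pvEmit, hq, pv_str_strip_ofList]
  | cons c t ih =>
    intro st buf hbuf
    rw [List.cons_append, List.foldl_cons]
    by_cases hc : pvDelim c = true
    · have hc' : (c == '\r' || c == '\n' || c == ',') = true := hc
      rw [if_pos hc']
      rw [ih _ [] (by simp)]
      conv_rhs => rw [pvToks, pvPieces_append_delim hbuf hc, List.filterMap_cons]
      by_cases hq : PySem.Chars.strip buf = []
      · have : PySem.Str.strip (String.ofList buf) = "" := by
          rw [pv_str_strip_ofList, hq]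
        simp only [this, if_pos rfl, pvEmit, hq, if_true, List.nil_append]
        rfl
      · have hne : ¬ (PySem.Str.strip (String.ofList buf) = "") := by
          rw [pv_str_strip_ofList, pv_ofList_eq_empty]; exact hq
        simp only [hne, if_false, pvEmit, hq, ite_false]
        rw [pv_str_strip_ofList]
        simp only [pvToks, pvEmit, List.append_assoc, List.map_cons, List.nil_append]
        rfl
    · simp only [Bool.not_eq_true] at hc
      have hc' : (c == '\r' || c == '\n' || c == ',') = false := hc
      rw [if_neg (by rw [hc']; exact Bool.false_ne_true)]
      rw [show ((st, buf ++ [c]) : List String × List Char) = (st, buf ++ [c]) from rfl]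
      rw [ih st (buf ++ [c]) (by
        intro x hx
        rcases List.mem_append.mp hx with h1 | h2
        · exact hbuf x h1
        · simp at h2; subst h2; exact hc)]
      rw [List.append_assoc]
      rfl

theorem pv_B_eq (s : String) (hs : ¬ s = "") :
    parse_manual_stimuli_py_alt (some s) = pvResult s.toList := by
  show (if s = "" then []
    else (((s ++ "\n").toList).foldl
        (fun (acc : List String × List Char) ch =>
          if ch == '\r' || ch == '\n' || ch == ',' then
            let token := PySem.Str.strip (String.ofList acc.2)
            (if token = "" then acc.1 else acc.1 ++ [token], [])
          else (acc.1, acc.2 ++ [ch]))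
        ([], [])).1) = pvResult s.toList
  rw [if_neg hs]
  rw [show (s ++ "\n").toList = s.toList ++ ['\n'] from by simp]
  rw [pv_B_loop s.toList [] [] (by simp)]
  simp [pvResult]

-- ===== VERDICT (by name: the statement is the Claim_ definition above) =====
theorem parse_manual_stimuli_py_spec : Claim_equal_parse_manual_stimuli_py := by
  intro text _
  unfold Spec_parse_manual_stimuli_py
  match text with
  | none => rfl
  | some s =>
    by_cases hs : s = ""
    · simp [parse_manual_stimuli_py, parse_manual_stimuli_py_alt, hs]
    · rw [pv_A_eq s hs, pv_B_eq s hs]
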